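-- pv_equiv track=rewrite | github.com/annekegh/tistools | lib/repptis_msm.py | create_labels_states_all
-- ===== SOURCE A (Python) =====
-- def create_labels_states_all(N):
--     """
--     Generate labels for all states, including absorbing and non-absorbing states.
--
--     This function creates a single list of state labels, including:
--     - The absorbing state `0-`
--     - All non-absorbing states
--     - The absorbing state `B`
--
--     Parameters
--     ----------
--     N : int
--         The total number of states. Must be at least 3.
--
--     Raises
--     ------
--     ValueError
--         If `N` is less than 3.
--
--     Returns
--     -------
--     labels : list of str
--         Labels for all `N` states in sequential order.
--     """
--     if N < 3:
--         raise ValueError(f"Expected N >= 3, but got {N}")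
--
--     labels = ["0-     ", "0+- LML", "0+- LMR", "0+- RML", "1+- LML", "1+- LMR"]
--
--     if N > 3:
--         for i in range(1, N - 2):
--             labels.extend([
--                 f"{i}+- RML",
--                 f"{i}+- RMR",
--                 f"{i+1}+- LML",
--                 f"{i+1}+- LMR"
--             ])
--
--     labels.append("B      ")
--
--     return labels
-- ===== SOURCE B (Python) =====
-- def create_labels_states_all(N):
--     if N < 3:
--         raise ValueError(f"Expected N >= 3, but got {N}")
--     SUFFIXES = ["LML", "LMR", "RML", "RMR"]
--
--     def label(k):
--         if k == 0:
--             return "0-     "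
--         if k == 4 * N - 6:
--             return "B      "
--         if k < 4:
--             return f"0+- {SUFFIXES[k - 1]}"
--         return f"{k // 4}+- {SUFFIXES[k % 4]}"
--
--     return [label(k) for k in range(4 * N - 5)]
-- ===== Notes on version B (the rewrite author's own statement) =====
-- stated objective: alternative
-- what changed: B computes each label by a closed-form position-to-label formula (state = k//4, suffix = SUFFIXES[k%4], with explicit endpoint cases) mapped over range(4*N-5), instead of A's incremental list extension per straddling pair.
import Mathlib
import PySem

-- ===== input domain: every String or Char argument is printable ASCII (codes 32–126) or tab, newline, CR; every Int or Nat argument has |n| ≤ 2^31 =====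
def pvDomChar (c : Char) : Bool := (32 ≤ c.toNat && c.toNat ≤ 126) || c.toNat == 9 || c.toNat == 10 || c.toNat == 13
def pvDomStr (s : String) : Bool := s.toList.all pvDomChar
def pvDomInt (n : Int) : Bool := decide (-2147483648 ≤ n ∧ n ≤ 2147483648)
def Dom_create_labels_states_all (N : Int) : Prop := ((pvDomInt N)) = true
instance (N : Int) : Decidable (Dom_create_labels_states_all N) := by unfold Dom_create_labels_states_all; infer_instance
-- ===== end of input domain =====

-- B replaces A's incremental list extension by a closed-form position→label map over range(4N-5); return value proved equal on N ≥ 3.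

-- ===== PORT A =====
def create_labels_states_all (N : Int) : List String :=
  let labels := ["0-     ", "0+- LML", "0+- LMR", "0+- RML", "1+- LML", "1+- LMR"]
  let labels :=
    if N > 3 then
      (PySem.List.pyRange 1 (N - 2) 1).foldl (fun acc i =>
        acc ++ [PySem.Int.toStr i ++ "+- RML",
                PySem.Int.toStr i ++ "+- RMR",
                PySem.Int.toStr (i + 1) ++ "+- LML",
                PySem.Int.toStr (i + 1) ++ "+- LMR"]) labels
    else labels
  labels ++ ["B      "]

-- ===== PORT B =====
def pvSuffixes : List String := ["LML", "LMR", "RML", "RMR"]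

-- the nested helper `label(k)` of Source B (list indexing is always in range on reachable branches)
def pvLabel (N : Int) (k : Int) : String :=
  if k = 0 then "0-     "
  else if k = 4 * N - 6 then "B      "
  else if k < 4 then
    "0+- " ++ PySem.List.pyGetD pvSuffixes (k - 1) ""
  else
    PySem.Int.toStr (PySem.Int.floordiv k 4) ++ "+- " ++
      PySem.List.pyGetD pvSuffixes (PySem.Int.mod k 4) ""

def create_labels_states_all_alt (N : Int) : List String :=
  (PySem.List.pyRange 0 (4 * N - 5) 1).map (pvLabel N)

-- ===== PRECONDITION & SPEC =====
-- A raises ValueError for N < 3; exactly those inputs are excluded.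
def Pre_create_labels_states_all (N : Int) : Prop := 3 ≤ N
instance (N : Int) : Decidable (Pre_create_labels_states_all N) := by unfold Pre_create_labels_states_all; infer_instance
def pvWitness_create_labels_states_all : Int := (3)
def Spec_create_labels_states_all (N : Int) (out : List String) : Prop := out = create_labels_states_all_alt N
instance (N : Int) (out : List String) : Decidable (Spec_create_labels_states_all N out) := by unfold Spec_create_labels_states_all; infer_instance

-- ===== CLAIM (what is proved, stated in full; the proofs are below) =====
def Claim_equal_create_labels_states_all : Prop := ∀ (N : Int), Dom_create_labels_states_all N → Pre_create_labels_states_all N → Spec_create_labels_states_all N (create_labels_states_all N)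

-- ===== LEMMAS AND PROOFS =====

-- the four labels of an interior state i
def pvGroup (i : Int) : List String :=
  [PySem.Int.toStr i ++ "+- LML", PySem.Int.toStr i ++ "+- LMR",
   PySem.Int.toStr i ++ "+- RML", PySem.Int.toStr i ++ "+- RMR"]

lemma pv_floordiv4 (i t : Int) (ht0 : 0 ≤ t) (ht : t < 4) :
    PySem.Int.floordiv (4 * i + t) 4 = i := by
  rw [PySem.Int.floordiv_eq_iff_of_pos (by omega)]
  omega

lemma pv_mod4 (i t : Int) (ht0 : 0 ≤ t) (ht : t < 4) :
    PySem.Int.mod (4 * i + t) 4 = t := by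
  rw [PySem.Int.mod_eq_emod_of_pos (by omega)]
  omega

lemma pv_label_interior (N i t : Int) (h1 : 1 ≤ i) (ht0 : 0 ≤ t) (ht : t < 4)
    (hne : 4 * i + t ≠ 4 * N - 6) :
    pvLabel N (4 * i + t) =
      PySem.Int.toStr i ++ "+- " ++ PySem.List.pyGetD pvSuffixes t "" := by
  unfold pvLabel
  rw [if_neg (by omega), if_neg hne, if_neg (by omega), pv_floordiv4 i t ht0 ht,
    pv_mod4 i t ht0 ht]

lemma pv_map4 (N i : Int) (h1 : 1 ≤ i) (h2 : i ≤ N - 3) :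
    [pvLabel N (4 * i), pvLabel N (4 * i + 1), pvLabel N (4 * i + 2), pvLabel N (4 * i + 3)]
      = pvGroup i := by
  have e0 : pvLabel N (4 * i) = PySem.Int.toStr i ++ "+- " ++ PySem.List.pyGetD pvSuffixes 0 "" := by
    have := pv_label_interior N i 0 h1 (by omega) (by omega) (by omega)
    simpa using this
  have e1 := pv_label_interior N i 1 h1 (by omega) (by omega) (by omega)
  have e2 := pv_label_interior N i 2 h1 (by omega) (by omega) (by omega)
  have e3 := pv_label_interior N i 3 h1 (by omega) (by omega) (by omega)
  rw [e0, e1, e2, e3]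
  unfold pvGroup
  rw [show PySem.List.pyGetD pvSuffixes 0 "" = "LML" from by decide,
    show PySem.List.pyGetD pvSuffixes 1 "" = "LMR" from by decide,
    show PySem.List.pyGetD pvSuffixes 2 "" = "RML" from by decide,
    show PySem.List.pyGetD pvSuffixes 3 "" = "RMR" from by decide,
    String.append_assoc, String.append_assoc, String.append_assoc, String.append_assoc]
  have hl : ("+- " ++ "LML" : String) = "+- LML" := by decide
  have hr : ("+- " ++ "LMR" : String) = "+- LMR" := by decide
  have h3 : ("+- " ++ "RML" : String) = "+- RML" := by decide
  have h4 : ("+- " ++ "RMR" : String) = "+- RMR" := by decide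
  rw [hl, hr, h3, h4]

lemma pv_interior (N m : Int) (hm : 1 ≤ m) (hmN : m ≤ N - 2) :
    (PySem.List.pyRange 4 (4 * m) 1).map (pvLabel N)
      = (PySem.List.pyRange 1 m 1).flatMap pvGroup := by
  induction m, hm using Int.le_induction with
  | base =>
      rw [PySem.List.pyRange_one_eq_nil (by omega), PySem.List.pyRange_one_eq_nil (by omega)]
      rfl
  | succ m hm ih =>
      rw [show 4 * (m + 1) = 4 * m + 1 + 1 + 1 + 1 by ring,
        PySem.List.pyRange_one_succ_right (by omega),
        PySem.List.pyRange_one_succ_right (by omega),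
        PySem.List.pyRange_one_succ_right (by omega),
        PySem.List.pyRange_one_succ_right (by omega),
        PySem.List.pyRange_one_succ_right (by omega : (1:Int) ≤ m)]
      simp only [List.map_append, List.map_cons, List.map_nil, List.flatMap_append,
        List.flatMap_cons, List.flatMap_nil, List.append_nil]
      rw [ih (by omega)]
      have h4 := pv_map4 N m (by omega) (by omega)
      simp only [List.append_assoc]
      rw [← h4]
      simp only [List.cons_append, List.nil_append, List.append_cancel_left_eq, List.cons.injEq,
        and_true, true_and]
      exact ⟨by congr 1; ring, by congr 1; ring⟩

lemma pv_label_last (N t : Int) (hN : 3 ≤ N) (ht0 : 0 ≤ t) (ht : t < 2) :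
    pvLabel N (4 * (N - 2) + t) =
      PySem.Int.toStr (N - 2) ++ "+- " ++ PySem.List.pyGetD pvSuffixes t "" :=
  pv_label_interior N (N - 2) t (by omega) ht0 (by omega) (by omega)

lemma pv_alt_eq (N : Int) (h : 3 ≤ N) :
    create_labels_states_all_alt N =
      ["0-     ", "0+- LML", "0+- LMR", "0+- RML"] ++
      (PySem.List.pyRange 1 (N - 2) 1).flatMap pvGroup ++
      [PySem.Int.toStr (N - 2) ++ "+- LML", PySem.Int.toStr (N - 2) ++ "+- LMR", "B      "] := by
  unfold create_labels_states_all_alt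
  rw [PySem.List.pyRange_one_append 0 4 (4 * N - 5) (by omega) (by omega),
    PySem.List.pyRange_one_append 4 (4 * (N - 2)) (4 * N - 5) (by omega) (by omega),
    show PySem.List.pyRange 0 4 1 = [0, 1, 2, 3] from by decide,
    PySem.List.pyRange_one_cons (by omega : 4 * (N - 2) < 4 * N - 5),
    PySem.List.pyRange_one_cons (by omega : 4 * (N - 2) + 1 < 4 * N - 5),
    PySem.List.pyRange_one_cons (by omega : 4 * (N - 2) + 1 + 1 < 4 * N - 5),
    PySem.List.pyRange_one_eq_nil (by omega : 4 * N - 5 ≤ 4 * (N - 2) + 1 + 1 + 1)]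
  simp only [List.map_append, List.map_cons, List.map_nil, pv_interior N (N - 2) (by omega) le_rfl]
  have e0 : pvLabel N 0 = "0-     " := by unfold pvLabel; rw [if_pos rfl]
  have e1 : pvLabel N 1 = "0+- LML" := by
    unfold pvLabel; rw [if_neg (by omega), if_neg (by omega), if_pos (by omega)]; decide
  have e2 : pvLabel N 2 = "0+- LMR" := by
    unfold pvLabel; rw [if_neg (by omega), if_neg (by omega), if_pos (by omega)]; decide
  have e3 : pvLabel N 3 = "0+- RML" := by
    unfold pvLabel; rw [if_neg (by omega), if_neg (by omega), if_pos (by omega)]; decide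
  have f0 : pvLabel N (4 * (N - 2)) = PySem.Int.toStr (N - 2) ++ "+- LML" := by
    have := pv_label_last N 0 h (by omega) (by omega)
    rw [show 4 * (N - 2) + 0 = 4 * (N - 2) by ring] at this
    rw [this, String.append_assoc]
    rw [show PySem.List.pyGetD pvSuffixes 0 "" = "LML" from by decide,
      show ("+- " ++ "LML" : String) = "+- LML" from by decide]
  have f1 : pvLabel N (4 * (N - 2) + 1) = PySem.Int.toStr (N - 2) ++ "+- LMR" := by
    rw [pv_label_last N 1 h (by omega) (by omega), String.append_assoc]
    rw [show PySem.List.pyGetD pvSuffixes 1 "" = "LMR" from by decide,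
      show ("+- " ++ "LMR" : String) = "+- LMR" from by decide]
  have f2 : pvLabel N (4 * (N - 2) + 1 + 1) = "B      " := by
    unfold pvLabel; rw [if_neg (by omega), if_pos (by omega)]
  rw [e0, e1, e2, e3, f0, f1, f2]
  simp

lemma pv_key (m : Int) (h : 1 ≤ m) :
    ["1+- LML", "1+- LMR"] ++ (PySem.List.pyRange 1 m 1).flatMap (fun i =>
        [PySem.Int.toStr i ++ "+- RML", PySem.Int.toStr i ++ "+- RMR",
         PySem.Int.toStr (i + 1) ++ "+- LML", PySem.Int.toStr (i + 1) ++ "+- LMR"])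
      = (PySem.List.pyRange 1 m 1).flatMap pvGroup
        ++ [PySem.Int.toStr m ++ "+- LML", PySem.Int.toStr m ++ "+- LMR"] := by
  induction m, h using Int.le_induction with
  | base =>
      rw [PySem.List.pyRange_one_eq_nil (by omega)]
      decide
  | succ m hm ih =>
      rw [PySem.List.pyRange_one_succ_right (by omega : (1:Int) ≤ m)]
      simp only [List.flatMap_append, List.flatMap_cons, List.flatMap_nil,
        List.append_nil, ← List.append_assoc, ih]
      unfold pvGroup
      simp

-- ===== VERDICT (by name: the statement is the Claim_ definition above) =====
theorem create_labels_states_all_spec : Claim_equal_create_labels_states_all := by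
  intro N _ hP
  unfold Spec_create_labels_states_all
  rw [pv_alt_eq N hP]
  unfold create_labels_states_all
  dsimp only
  by_cases h : N > 3
  · rw [if_pos h, PySem.List.foldl_append_eq_flatMap]
    have hk := pv_key (N - 2) (by omega)
    simp only [show (["0-     ", "0+- LML", "0+- LMR", "0+- RML", "1+- LML", "1+- LMR"] : List String)
        = ["0-     ", "0+- LML", "0+- LMR", "0+- RML"] ++ ["1+- LML", "1+- LMR"] from rfl,
      List.append_assoc, hk]
    simp
  · have h3 : N = 3 := by
      unfold Pre_create_labels_states_all at hP
      omega
    subst h3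
    rw [if_neg h, PySem.List.pyRange_one_eq_nil (by omega)]
    decide
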